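-- pv_equiv track=rewrite | github.com/Zemelee/SEAL | eval_MATH_vllm.py | trim_output
-- ===== SOURCE A (Python) =====
-- def trim_output(output):
--     instruction_prefix = "Answer the following question"
--     question_prefix = 'Question:'
--     comment_prefix = 'Comment:'  # for some reason, Llama 13B likes to generate these comments indefinitely
--
--     for prefix in [instruction_prefix, question_prefix, comment_prefix]:
--         if prefix in output:
--             output = output.split(prefix)[0]
--
--     return output
-- ===== SOURCE B (Python) =====
-- def trim_output(output):
--     prefixes = ("Answer the following question", "Question:", "Comment:")
--     idxs = [i for i in (output.find(p) for p in prefixes) if i >= 0]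
--     if idxs:
--         return output[:min(idxs)]
--     return output
-- ===== Notes on version B (the rewrite author's own statement) =====
-- stated objective: alternative
-- what changed: B computes each prefix's first-occurrence index with find in one independent pass and slices once at the minimum, instead of A's sequential search-split-retruncate loop over the prefixes.
import Mathlib
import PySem

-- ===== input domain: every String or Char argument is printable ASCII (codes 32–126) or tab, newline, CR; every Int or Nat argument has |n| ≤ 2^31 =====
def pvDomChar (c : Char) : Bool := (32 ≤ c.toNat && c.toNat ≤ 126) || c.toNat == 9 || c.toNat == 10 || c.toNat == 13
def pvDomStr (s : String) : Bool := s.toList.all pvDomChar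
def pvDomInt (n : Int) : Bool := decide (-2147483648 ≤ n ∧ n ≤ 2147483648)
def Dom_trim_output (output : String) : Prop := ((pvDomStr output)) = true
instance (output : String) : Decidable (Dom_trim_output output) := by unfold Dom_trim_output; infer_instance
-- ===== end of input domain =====

-- B gathers the find-index of each prefix once and slices at the minimum, replacing A's
-- sequential search-and-retruncate loop (objective: alternative decomposition, same cost).


-- ===== PORT A =====
-- output.split(prefix)[0]: every prefix literal is nonempty so split? is `some`, and
-- Python's split always yields a nonempty list, so `.getD []`/`.headD ""` are exact.
def trimStep (out p : String) : String :=
  if PySem.Str.isIn p out then ((PySem.Str.split? out p).getD []).headD "" else out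

def trim_output (output : String) : String :=
  ["Answer the following question", "Question:", "Comment:"].foldl trimStep output

-- ===== PORT B =====
-- idxs = [i for i in (output.find(p) for p in prefixes) if i >= 0]; output[:min(idxs)] if idxs else output
def trim_output_alt (output : String) : String :=
  match PySem.List.min?
      ((["Answer the following question", "Question:", "Comment:"].map
          (fun p => PySem.Str.find output p)).filter (fun i => decide (0 ≤ i))) id with
  | some m => PySem.Str.slice output none (some m)
  | none => output

-- ===== PRECONDITION & SPEC =====
def Spec_trim_output (output : String) (out : String) : Prop := out = trim_output_alt output
instance (output : String) (out : String) : Decidable (Spec_trim_output output out) := by unfold Spec_trim_output; infer_instance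

-- ===== CLAIM (what is proved, stated in full; the proofs are below) =====
def Claim_equal_trim_output : Prop := ∀ (output : String), Dom_trim_output output → Spec_trim_output output (trim_output output)

-- ===== LEMMAS AND PROOFS =====

-- the three defining equations of PySem.Chars.splitOn.go
lemma go_zero (sep l cur : List Char) (acc : List (List Char)) :
    PySem.Chars.splitOn.go sep 0 l cur acc = ((cur.reverse ++ l) :: acc).reverse := rfl

lemma go_nil (sep cur : List Char) (f : Nat) (acc : List (List Char)) :
    PySem.Chars.splitOn.go sep (f + 1) [] cur acc = (cur.reverse :: acc).reverse := rfl

lemma go_cons (sep cur : List Char) (f : Nat) (c : Char) (rest : List Char)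
    (acc : List (List Char)) :
    PySem.Chars.splitOn.go sep (f + 1) (c :: rest) cur acc
      = if sep.isPrefixOf (c :: rest) then
          PySem.Chars.splitOn.go sep f (List.drop sep.length (c :: rest)) [] (cur.reverse :: acc)
        else PySem.Chars.splitOn.go sep f rest (c :: cur) acc := rfl

-- once the accumulator of splitOn.go is nonempty, the head of the final (reversed) result is fixed
lemma go_headD_acc (sep : List Char) :
    ∀ (fuel : Nat) (l cur : List Char) (acc : List (List Char)) (x : List Char),
      (PySem.Chars.splitOn.go sep fuel l cur (acc ++ [x])).headD [] = x := by
  intro fuel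
  induction fuel with
  | zero => intro l cur acc x; rw [go_zero]; simp
  | succ f ih =>
    intro l cur acc x
    cases l with
    | nil => rw [go_nil]; simp
    | cons c rest =>
      rw [go_cons]
      by_cases hp : sep.isPrefixOf (c :: rest)
      · have h := ih (List.drop sep.length (c :: rest)) [] (cur.reverse :: acc) x
        rw [List.cons_append] at h
        simpa [hp] using h
      · simpa [hp] using ih rest (c :: cur) acc x

-- find.go at offset k is find.go at offset 0 shifted by k
lemma findgo_shift (sub : List Char) (hs : sub ≠ []) :
    ∀ (l : List Char) (k : Nat),
      PySem.Chars.find.go sub l k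
        = if PySem.Chars.find.go sub l 0 = -1 then -1 else PySem.Chars.find.go sub l 0 + k := by
  intro l
  induction l with
  | nil => intro k; simp [PySem.Chars.find.go, List.isEmpty_iff, hs]
  | cons c t ih =>
    intro k
    have ht : -1 ≤ PySem.Chars.find.go sub t 0 := by
      simpa [PySem.Chars.find] using PySem.Chars.neg_one_le_find t sub
    simp only [PySem.Chars.find.go]
    by_cases hp : sub.isPrefixOf (c :: t)
    · simp [hp]
    · simp only [hp]
      rw [ih (k + 1), ih 1]
      split_ifs with h1 h2 h3 <;> omega

-- head of splitOn.go with empty accumulator: everything before the first match (or all of l)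
lemma go_headD (sep : List Char) (hs : sep ≠ []) :
    ∀ (l cur : List Char) (fuel : Nat), l.length < fuel →
      (PySem.Chars.splitOn.go sep fuel l cur []).headD []
        = cur.reverse ++ (if PySem.Chars.find.go sep l 0 = -1 then l
            else l.take (PySem.Chars.find.go sep l 0).toNat) := by
  intro l
  induction l with
  | nil =>
    intro cur fuel hf
    cases fuel with
    | zero => omega
    | succ f => rw [go_nil]; simp [PySem.Chars.find.go, List.isEmpty_iff, hs]
  | cons c t ih =>
    intro cur fuel hf
    cases fuel with
    | zero => omega
    | succ f =>
      rw [go_cons]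
      by_cases hp : sep.isPrefixOf (c :: t)
      · have h0 : PySem.Chars.find.go sep (c :: t) 0 = 0 := by
          simp [PySem.Chars.find.go, hp]
        rw [h0]
        simpa [hp] using go_headD_acc sep f (List.drop sep.length (c :: t)) [] [] cur.reverse
      · have hlen : t.length < f := by simpa using hf
        have ht : -1 ≤ PySem.Chars.find.go sep t 0 := by
          simpa [PySem.Chars.find] using PySem.Chars.neg_one_le_find t sep
        have hshift : PySem.Chars.find.go sep (c :: t) 0
            = if PySem.Chars.find.go sep t 0 = -1 then -1
              else PySem.Chars.find.go sep t 0 + 1 := by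
          simp only [PySem.Chars.find.go, hp]
          exact findgo_shift sep hs t 1
        rw [if_neg hp]
        rw [ih (c :: cur) f hlen, hshift]
        by_cases h0 : PySem.Chars.find.go sep t 0 = -1
        · simp [h0]
        · have htn : (PySem.Chars.find.go sep t 0 + 1).toNat
              = (PySem.Chars.find.go sep t 0).toNat + 1 := by omega
          rw [if_neg h0, if_neg (by omega), if_neg h0, htn]
          simp

-- characterization of one A-step as truncation at the find index
lemma trimStep_eq (out p : String) (hp : p.toList ≠ []) :
    (trimStep out p).toList
      = if PySem.Chars.find out.toList p.toList = -1 then out.toList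
        else out.toList.take (PySem.Chars.find out.toList p.toList).toNat := by
  unfold trimStep
  by_cases hin : PySem.Str.isIn p out = true
  · have hfind : PySem.Chars.find out.toList p.toList ≠ -1 := by
      rw [PySem.Str.isIn_eq, PySem.Chars.isIn] at hin
      simpa using hin
    rw [if_pos hin, if_neg hfind]
    have hsplit : PySem.Str.split? out p
        = some ((PySem.Chars.splitOn out.toList p.toList).map String.ofList) := by
      simp [PySem.Str.split?, PySem.Chars.split?, List.isEmpty_iff, hp]
    rw [hsplit, Option.getD_some]
    have hhead : ∀ (L : List (List Char)),
        ((L.map String.ofList).headD "").toList = L.headD [] := by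
      intro L; cases L <;> simp
    rw [hhead]
    have hgo := go_headD p.toList hp out.toList [] (out.toList.length + 1) (by omega)
    rw [PySem.Chars.splitOn]
    rw [hgo]
    have : PySem.Chars.find.go p.toList out.toList 0
        = PySem.Chars.find out.toList p.toList := rfl
    rw [this, if_neg hfind, List.reverse_nil, List.nil_append]
  · have hfind : PySem.Chars.find out.toList p.toList = -1 := by
      rw [PySem.Str.isIn_eq, PySem.Chars.isIn] at hin
      simpa using hin
    rw [if_neg hin, if_pos hfind]

-- a prefix of a dropped truncation is an occurrence in the full string
lemma prefix_of_take_drop {q s : List Char} {n k : Nat}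
    (h : q <+: (s.take n).drop k) : q <+: s.drop k := by
  rw [List.drop_take] at h
  exact h.trans (List.take_prefix _ _)

-- find in a truncated string, when the cut-off character cannot occur inside q past its head
lemma find_take_eq (s q : List Char) (n : Nat) (c0 : Char)
    (hq : q ≠ []) (hc : c0 ∉ q.drop 1) (hn : s[n]? = some c0) :
    PySem.Chars.find (s.take n) q
      = if 0 ≤ PySem.Chars.find s q ∧ PySem.Chars.find s q < (n : Int)
        then PySem.Chars.find s q else -1 := by
  have hql : 0 < q.length := List.length_pos_iff.mpr hq
  obtain ⟨hnlen, hsn⟩ := List.getElem?_eq_some_iff.mp hn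
  split_ifs with h
  · obtain ⟨h0, hlt⟩ := h
    obtain ⟨hpref, hmin⟩ := PySem.Chars.find_spec h0
    have hltn : (PySem.Chars.find s q).toNat < n := by omega
    -- no overlap: the occurrence at find s q ends at or before n
    have hnov : (PySem.Chars.find s q).toNat + q.length ≤ n := by
      by_contra hcon
      push_neg at hcon
      have hidx : n - (PySem.Chars.find s q).toNat < q.length := by omega
      have hq1 : q[n - (PySem.Chars.find s q).toNat] = s[n]'hnlen := by
        rw [hpref.getElem hidx, List.getElem_drop]
        congr 1
        omega
      have hmem : (q.drop 1)[n - (PySem.Chars.find s q).toNat - 1]? = some c0 := by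
        rw [List.getElem?_drop]
        have heq : 1 + (n - (PySem.Chars.find s q).toNat - 1)
            = n - (PySem.Chars.find s q).toNat := by omega
        rw [heq, List.getElem?_eq_getElem hidx, hq1, hsn]
      exact hc (List.mem_of_getElem? hmem)
    -- occurrence survives in the truncation
    have hocc : q <+: (s.take n).drop (PySem.Chars.find s q).toNat := by
      rw [List.drop_take]
      exact List.prefix_take_iff.mpr ⟨hpref, by omega⟩
    have hg0 : 0 ≤ PySem.Chars.find (s.take n) q := by
      have hin : PySem.Chars.isIn q (s.take n) = true :=
        (PySem.Chars.exists_prefix_drop_iff_isIn q (s.take n)).mp ⟨_, hocc⟩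
      have hne : PySem.Chars.find (s.take n) q ≠ -1 := by
        rw [Ne, PySem.Chars.find_eq_neg_one_iff, not_not]
        exact (PySem.Chars.isIn_iff_infix q (s.take n)).mp hin
      have := PySem.Chars.neg_one_le_find (s.take n) q
      omega
    obtain ⟨hgpref, hgmin⟩ := PySem.Chars.find_spec hg0
    have hle1 : (PySem.Chars.find (s.take n) q).toNat ≤ (PySem.Chars.find s q).toNat := by
      by_contra hcon
      push_neg at hcon
      exact absurd hocc (hgmin _ hcon)
    have hle2 : (PySem.Chars.find s q).toNat ≤ (PySem.Chars.find (s.take n) q).toNat := by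
      by_contra hcon
      push_neg at hcon
      exact absurd (prefix_of_take_drop hgpref) (hmin _ hcon)
    omega
  · push_neg at h
    by_contra hne
    have hg0 : 0 ≤ PySem.Chars.find (s.take n) q := by
      have := PySem.Chars.neg_one_le_find (s.take n) q
      omega
    obtain ⟨hgpref, hgmin⟩ := PySem.Chars.find_spec hg0
    have hins : q <+: s.drop (PySem.Chars.find (s.take n) q).toNat :=
      prefix_of_take_drop hgpref
    have hlen2 : q.length ≤ n - (PySem.Chars.find (s.take n) q).toNat := by
      have hl := hgpref.length_le
      simp only [List.length_drop, List.length_take] at hl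
      omega
    have hfq0 : 0 ≤ PySem.Chars.find s q := by
      have hin : PySem.Chars.isIn q s = true :=
        (PySem.Chars.exists_prefix_drop_iff_isIn q s).mp ⟨_, hins⟩
      have hne' : PySem.Chars.find s q ≠ -1 := by
        rw [Ne, PySem.Chars.find_eq_neg_one_iff, not_not]
        exact (PySem.Chars.isIn_iff_infix q s).mp hin
      have := PySem.Chars.neg_one_le_find s q
      omega
    have hnle : (n : Int) ≤ PySem.Chars.find s q := h hfq0
    obtain ⟨_, hmin⟩ := PySem.Chars.find_spec hfq0
    exact absurd hins (hmin _ (by omega))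

lemma getElem?_at_find (s p : List Char) (c : Char) (hc : p[0]? = some c)
    (h0 : 0 ≤ PySem.Chars.find s p) :
    s[(PySem.Chars.find s p).toNat]? = some c := by
  obtain ⟨hpref, -⟩ := PySem.Chars.find_spec h0
  obtain ⟨hl, hpc⟩ := List.getElem?_eq_some_iff.mp hc
  have hlen := hpref.length_le
  simp only [List.length_drop] at hlen
  have hl2 : (PySem.Chars.find s p).toNat < s.length := by omega
  have hg := hpref.getElem (i := 0) hl
  rw [List.getElem_drop] at hg
  rw [List.getElem?_eq_some_iff]
  exact ⟨hl2, by simpa [hpc] using hg.symm⟩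

-- ===== VERDICT (by name: the statement is the Claim_ definition above) =====
set_option maxHeartbeats 1000000 in
theorem trim_output_spec : Claim_equal_trim_output := by
  intro output _
  unfold Spec_trim_output
  unfold trim_output trim_output_alt
  simp only [List.foldl_cons, List.foldl_nil, List.map_cons, List.map_nil, PySem.Str.find_eq]
  refine String.toList_inj.mp ?_
  have h1 := trimStep_eq output "Answer the following question" (by decide)
  have h2 := trimStep_eq (trimStep output "Answer the following question") "Question:" (by decide)
  have h3 := trimStep_eq (trimStep (trimStep output "Answer the following question") "Question:")
    "Comment:" (by decide)
  rw [h3, h2, h1]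
  have hb1 := PySem.Chars.neg_one_le_find output.toList ("Answer the following question" : String).toList
  have hb2 := PySem.Chars.neg_one_le_find output.toList ("Question:" : String).toList
  have hb3 := PySem.Chars.neg_one_le_find output.toList ("Comment:" : String).toList
  by_cases hc1 : PySem.Chars.find output.toList ("Answer the following question" : String).toList = -1
  · rw [if_pos hc1]
    have hd1 : decide (0 ≤ PySem.Chars.find output.toList ("Answer the following question" : String).toList) = false := by rw [hc1]; decide
    by_cases hc2 : PySem.Chars.find output.toList ("Question:" : String).toList = -1
    · rw [if_pos hc2]
      have hd2 : decide (0 ≤ PySem.Chars.find output.toList ("Question:" : String).toList) = false := by rw [hc2]; decide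
      by_cases hc3 : PySem.Chars.find output.toList ("Comment:" : String).toList = -1
      · rw [if_pos hc3]
        have hd3 : decide (0 ≤ PySem.Chars.find output.toList ("Comment:" : String).toList) = false := by rw [hc3]; decide
        simp only [List.filter_cons, List.filter_nil, hd1, hd2, hd3, Bool.false_eq_true,
            reduceIte, PySem.List.min?, List.foldl_cons, List.foldl_nil, id]
      · have h03 : 0 ≤ PySem.Chars.find output.toList ("Comment:" : String).toList := by omega
        rw [if_neg hc3]
        have hd3 : decide (0 ≤ PySem.Chars.find output.toList ("Comment:" : String).toList) = true := by simpa using h03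
        simp only [List.filter_cons, List.filter_nil, hd1, hd2, hd3, Bool.false_eq_true,
            reduceIte, PySem.List.min?, List.foldl_cons, List.foldl_nil, id]
        rw [PySem.Str.toList_slice, PySem.Chars.slice_eq_listSlice, PySem.List.slice_to _ h03]
    · have h02 : 0 ≤ PySem.Chars.find output.toList ("Question:" : String).toList := by omega
      have hd2 : decide (0 ≤ PySem.Chars.find output.toList ("Question:" : String).toList) = true := by simpa using h02
      rw [if_neg hc2]
      have hn2 : output.toList[(PySem.Chars.find output.toList ("Question:" : String).toList).toNat]? = some 'Q' :=
        getElem?_at_find _ _ 'Q' (by decide) h02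
      have hft := find_take_eq output.toList ("Comment:" : String).toList
        (PySem.Chars.find output.toList ("Question:" : String).toList).toNat 'Q' (by decide) (by decide) hn2
      rw [Int.toNat_of_nonneg h02] at hft
      rw [hft]
      by_cases hc3 : 0 ≤ PySem.Chars.find output.toList ("Comment:" : String).toList ∧ PySem.Chars.find output.toList ("Comment:" : String).toList < PySem.Chars.find output.toList ("Question:" : String).toList
      · rw [if_pos hc3]
        obtain ⟨h03, hlt⟩ := hc3
        rw [if_neg (by omega : ¬ (PySem.Chars.find output.toList ("Comment:" : String).toList = -1))]
        have hd3 : decide (0 ≤ PySem.Chars.find output.toList ("Comment:" : String).toList) = true := by simpa using h03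
        simp only [List.filter_cons, List.filter_nil, hd1, hd2, hd3, Bool.false_eq_true,
            reduceIte, PySem.List.min?, List.foldl_cons, List.foldl_nil, id, hlt]
        rw [PySem.Str.toList_slice, PySem.Chars.slice_eq_listSlice,
          PySem.List.slice_to _ h03, List.take_take]
        have hmin : min (PySem.Chars.find output.toList ("Comment:" : String).toList).toNat (PySem.Chars.find output.toList ("Question:" : String).toList).toNat = (PySem.Chars.find output.toList ("Comment:" : String).toList).toNat := by omega
        rw [hmin]
      · rw [if_neg hc3, if_pos rfl]
        by_cases hc3' : PySem.Chars.find output.toList ("Comment:" : String).toList = -1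
        · have hd3 : decide (0 ≤ PySem.Chars.find output.toList ("Comment:" : String).toList) = false := by rw [hc3']; decide
          simp only [List.filter_cons, List.filter_nil, hd1, hd2, hd3, Bool.false_eq_true,
            reduceIte, PySem.List.min?, List.foldl_cons, List.foldl_nil, id]
          rw [PySem.Str.toList_slice, PySem.Chars.slice_eq_listSlice, PySem.List.slice_to _ h02]
        · have h03 : 0 ≤ PySem.Chars.find output.toList ("Comment:" : String).toList := by omega
          have hd3 : decide (0 ≤ PySem.Chars.find output.toList ("Comment:" : String).toList) = true := by simpa using h03
          have hge : ¬ (PySem.Chars.find output.toList ("Comment:" : String).toList < PySem.Chars.find output.toList ("Question:" : String).toList) := by omega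
          simp only [List.filter_cons, List.filter_nil, hd1, hd2, hd3, Bool.false_eq_true,
            reduceIte, PySem.List.min?, List.foldl_cons, List.foldl_nil, id, hge]
          rw [PySem.Str.toList_slice, PySem.Chars.slice_eq_listSlice, PySem.List.slice_to _ h02]
  · have h01 : 0 ≤ PySem.Chars.find output.toList ("Answer the following question" : String).toList := by omega
    have hd1 : decide (0 ≤ PySem.Chars.find output.toList ("Answer the following question" : String).toList) = true := by simpa using h01
    rw [if_neg hc1]
    have hn1 : output.toList[(PySem.Chars.find output.toList ("Answer the following question" : String).toList).toNat]? = some 'A' :=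
      getElem?_at_find _ _ 'A' (by decide) h01
    have hftQ := find_take_eq output.toList ("Question:" : String).toList
      (PySem.Chars.find output.toList ("Answer the following question" : String).toList).toNat 'A' (by decide) (by decide) hn1
    have hftC := find_take_eq output.toList ("Comment:" : String).toList
      (PySem.Chars.find output.toList ("Answer the following question" : String).toList).toNat 'A' (by decide) (by decide) hn1
    rw [Int.toNat_of_nonneg h01] at hftQ hftC
    rw [hftQ]
    by_cases hc2 : 0 ≤ PySem.Chars.find output.toList ("Question:" : String).toList ∧ PySem.Chars.find output.toList ("Question:" : String).toList < PySem.Chars.find output.toList ("Answer the following question" : String).toList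
    · rw [if_pos hc2]
      have h02 := hc2.1
      have hlt21 := hc2.2
      have hd2 : decide (0 ≤ PySem.Chars.find output.toList ("Question:" : String).toList) = true := by simpa using h02
      rw [if_neg (by omega : ¬ (PySem.Chars.find output.toList ("Question:" : String).toList = -1))]
      have hmin21 : min (PySem.Chars.find output.toList ("Question:" : String).toList).toNat (PySem.Chars.find output.toList ("Answer the following question" : String).toList).toNat = (PySem.Chars.find output.toList ("Question:" : String).toList).toNat := by omega
      rw [List.take_take, hmin21]
      have hn2 : output.toList[(PySem.Chars.find output.toList ("Question:" : String).toList).toNat]? = some 'Q' :=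
        getElem?_at_find _ _ 'Q' (by decide) h02
      have hftC2 := find_take_eq output.toList ("Comment:" : String).toList
        (PySem.Chars.find output.toList ("Question:" : String).toList).toNat 'Q' (by decide) (by decide) hn2
      rw [Int.toNat_of_nonneg h02] at hftC2
      rw [hftC2]
      by_cases hc3 : 0 ≤ PySem.Chars.find output.toList ("Comment:" : String).toList ∧ PySem.Chars.find output.toList ("Comment:" : String).toList < PySem.Chars.find output.toList ("Question:" : String).toList
      · rw [if_pos hc3]
        obtain ⟨h03, hlt32⟩ := hc3
        have hd3 : decide (0 ≤ PySem.Chars.find output.toList ("Comment:" : String).toList) = true := by simpa using h03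
        rw [if_neg (by omega : ¬ (PySem.Chars.find output.toList ("Comment:" : String).toList = -1))]
        simp only [List.filter_cons, List.filter_nil, hd1, hd2, hd3, Bool.false_eq_true,
            reduceIte, PySem.List.min?, List.foldl_cons, List.foldl_nil, id, hlt21, hlt32]
        rw [PySem.Str.toList_slice, PySem.Chars.slice_eq_listSlice,
          PySem.List.slice_to _ h03, List.take_take]
        have hmin32 : min (PySem.Chars.find output.toList ("Comment:" : String).toList).toNat (PySem.Chars.find output.toList ("Question:" : String).toList).toNat = (PySem.Chars.find output.toList ("Comment:" : String).toList).toNat := by omega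
        rw [hmin32]
      · rw [if_neg hc3, if_pos rfl]
        by_cases hc3' : PySem.Chars.find output.toList ("Comment:" : String).toList = -1
        · have hd3 : decide (0 ≤ PySem.Chars.find output.toList ("Comment:" : String).toList) = false := by rw [hc3']; decide
          simp only [List.filter_cons, List.filter_nil, hd1, hd2, hd3, Bool.false_eq_true,
            reduceIte, PySem.List.min?, List.foldl_cons, List.foldl_nil, id, hlt21]
          rw [PySem.Str.toList_slice, PySem.Chars.slice_eq_listSlice, PySem.List.slice_to _ h02]
        · have h03 : 0 ≤ PySem.Chars.find output.toList ("Comment:" : String).toList := by omega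
          have hd3 : decide (0 ≤ PySem.Chars.find output.toList ("Comment:" : String).toList) = true := by simpa using h03
          have hge32 : ¬ (PySem.Chars.find output.toList ("Comment:" : String).toList < PySem.Chars.find output.toList ("Question:" : String).toList) := by omega
          simp only [List.filter_cons, List.filter_nil, hd1, hd2, hd3, Bool.false_eq_true,
            reduceIte, PySem.List.min?, List.foldl_cons, List.foldl_nil, id, hlt21, hge32]
          rw [PySem.Str.toList_slice, PySem.Chars.slice_eq_listSlice, PySem.List.slice_to _ h02]
    · rw [if_neg hc2, if_pos rfl]
      rw [hftC]
      by_cases hc3 : 0 ≤ PySem.Chars.find output.toList ("Comment:" : String).toList ∧ PySem.Chars.find output.toList ("Comment:" : String).toList < PySem.Chars.find output.toList ("Answer the following question" : String).toList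
      · rw [if_pos hc3]
        obtain ⟨h03, hlt31⟩ := hc3
        have hd3 : decide (0 ≤ PySem.Chars.find output.toList ("Comment:" : String).toList) = true := by simpa using h03
        rw [if_neg (by omega : ¬ (PySem.Chars.find output.toList ("Comment:" : String).toList = -1))]
        have hmin31 : min (PySem.Chars.find output.toList ("Comment:" : String).toList).toNat (PySem.Chars.find output.toList ("Answer the following question" : String).toList).toNat = (PySem.Chars.find output.toList ("Comment:" : String).toList).toNat := by omega
        rw [List.take_take, hmin31]
        by_cases hc2' : PySem.Chars.find output.toList ("Question:" : String).toList = -1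
        · have hd2 : decide (0 ≤ PySem.Chars.find output.toList ("Question:" : String).toList) = false := by rw [hc2']; decide
          simp only [List.filter_cons, List.filter_nil, hd1, hd2, hd3, Bool.false_eq_true,
            reduceIte, PySem.List.min?, List.foldl_cons, List.foldl_nil, id, hlt31]
          rw [PySem.Str.toList_slice, PySem.Chars.slice_eq_listSlice, PySem.List.slice_to _ h03]
        · have h02 : 0 ≤ PySem.Chars.find output.toList ("Question:" : String).toList := by omega
          have hd2 : decide (0 ≤ PySem.Chars.find output.toList ("Question:" : String).toList) = true := by simpa using h02
          have hge21 : ¬ (PySem.Chars.find output.toList ("Question:" : String).toList < PySem.Chars.find output.toList ("Answer the following question" : String).toList) := by omega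
          simp only [List.filter_cons, List.filter_nil, hd1, hd2, hd3, Bool.false_eq_true,
            reduceIte, PySem.List.min?, List.foldl_cons, List.foldl_nil, id, hge21, hlt31]
          rw [PySem.Str.toList_slice, PySem.Chars.slice_eq_listSlice, PySem.List.slice_to _ h03]
      · rw [if_neg hc3, if_pos rfl]
        by_cases hc2' : PySem.Chars.find output.toList ("Question:" : String).toList = -1
        · have hd2 : decide (0 ≤ PySem.Chars.find output.toList ("Question:" : String).toList) = false := by rw [hc2']; decide
          by_cases hc3' : PySem.Chars.find output.toList ("Comment:" : String).toList = -1
          · have hd3 : decide (0 ≤ PySem.Chars.find output.toList ("Comment:" : String).toList) = false := by rw [hc3']; decide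
            simp only [List.filter_cons, List.filter_nil, hd1, hd2, hd3, Bool.false_eq_true,
            reduceIte, PySem.List.min?, List.foldl_cons, List.foldl_nil, id]
            rw [PySem.Str.toList_slice, PySem.Chars.slice_eq_listSlice, PySem.List.slice_to _ h01]
          · have h03 : 0 ≤ PySem.Chars.find output.toList ("Comment:" : String).toList := by omega
            have hd3 : decide (0 ≤ PySem.Chars.find output.toList ("Comment:" : String).toList) = true := by simpa using h03
            have hge31 : ¬ (PySem.Chars.find output.toList ("Comment:" : String).toList < PySem.Chars.find output.toList ("Answer the following question" : String).toList) := by omega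
            simp only [List.filter_cons, List.filter_nil, hd1, hd2, hd3, Bool.false_eq_true,
            reduceIte, PySem.List.min?, List.foldl_cons, List.foldl_nil, id, hge31]
            rw [PySem.Str.toList_slice, PySem.Chars.slice_eq_listSlice, PySem.List.slice_to _ h01]
        · have h02 : 0 ≤ PySem.Chars.find output.toList ("Question:" : String).toList := by omega
          have hd2 : decide (0 ≤ PySem.Chars.find output.toList ("Question:" : String).toList) = true := by simpa using h02
          have hge21 : ¬ (PySem.Chars.find output.toList ("Question:" : String).toList < PySem.Chars.find output.toList ("Answer the following question" : String).toList) := by omega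
          by_cases hc3' : PySem.Chars.find output.toList ("Comment:" : String).toList = -1
          · have hd3 : decide (0 ≤ PySem.Chars.find output.toList ("Comment:" : String).toList) = false := by rw [hc3']; decide
            simp only [List.filter_cons, List.filter_nil, hd1, hd2, hd3, Bool.false_eq_true,
            reduceIte, PySem.List.min?, List.foldl_cons, List.foldl_nil, id, hge21]
            rw [PySem.Str.toList_slice, PySem.Chars.slice_eq_listSlice, PySem.List.slice_to _ h01]
          · have h03 : 0 ≤ PySem.Chars.find output.toList ("Comment:" : String).toList := by omega
            have hd3 : decide (0 ≤ PySem.Chars.find output.toList ("Comment:" : String).toList) = true := by simpa using h03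
            have hge31 : ¬ (PySem.Chars.find output.toList ("Comment:" : String).toList < PySem.Chars.find output.toList ("Answer the following question" : String).toList) := by omega
            simp only [List.filter_cons, List.filter_nil, hd1, hd2, hd3, Bool.false_eq_true,
            reduceIte, PySem.List.min?, List.foldl_cons, List.foldl_nil, id, hge21, hge31]
            rw [PySem.Str.toList_slice, PySem.Chars.slice_eq_listSlice, PySem.List.slice_to _ h01]
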